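-- pv_equiv track=rewrite | github.com/calebsandler/sj-mba | utils/build_html.py | process_flow_block
-- ===== SOURCE A (Python) =====
-- def process_flow_block(content):
--     """
--     Convert:
--     :::flow
--     Step 1 -> Step 2 -> Step 3 -> [Result]
--     :::
--     """
--     line = content.strip()
--     steps = [s.strip() for s in line.split('->')]
--     flow_html = ['<div class="flow-diagram">']
--     for i, step in enumerate(steps):
--         # Check if it's a result (wrapped in brackets)
--         is_result = step.startswith('[') and step.endswith(']')
--         if is_result:
--             step = step[1:-1]
--             flow_html.append(f'<div class="flow-box flow-result">{step}</div>')
--         else: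
--             flow_html.append(f'<div class="flow-box">{step}</div>')
--
--         if i < len(steps) - 1:
--             flow_html.append('<span class="flow-arrow">→</span>')
--
--     flow_html.append('</div>')
--     return '\n'.join(flow_html)
-- ===== SOURCE B (Python) =====
-- def process_flow_block(content):
--     """
--     Convert:
--     :::flow
--     Step 1 -> Step 2 -> Step 3 -> [Result]
--     :::
--     """
--     ARROW = '\n<span class="flow-arrow">\u2192</span>\n'
--
--     def box(seg):
--         s = seg.strip()
--         if s.startswith('[') and s.endswith(']'):
--             return f'<div class="flow-box flow-result">{s[1:-1]}</div>'
--         return f'<div class="flow-box">{s}</div>'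
--
--     def render(rest):
--         i = rest.find('->')
--         if i < 0:
--             return box(rest)
--         return box(rest[:i]) + ARROW + render(rest[i + 2:])
--
--     return '<div class="flow-diagram">\n' + render(content.strip()) + '\n</div>'
-- ===== Notes on version B (the rewrite author's own statement) =====
-- stated objective: alternative
-- what changed: Replaces A's split-into-a-list + indexed loop with conditional arrow appends + final join by a recursive descent parser: it repeatedly finds the next arrow token in the remaining string, emits the box for the prefix and an arrow span, and recurses on the suffix, never materializing a step list or joining.
import Mathlib
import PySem

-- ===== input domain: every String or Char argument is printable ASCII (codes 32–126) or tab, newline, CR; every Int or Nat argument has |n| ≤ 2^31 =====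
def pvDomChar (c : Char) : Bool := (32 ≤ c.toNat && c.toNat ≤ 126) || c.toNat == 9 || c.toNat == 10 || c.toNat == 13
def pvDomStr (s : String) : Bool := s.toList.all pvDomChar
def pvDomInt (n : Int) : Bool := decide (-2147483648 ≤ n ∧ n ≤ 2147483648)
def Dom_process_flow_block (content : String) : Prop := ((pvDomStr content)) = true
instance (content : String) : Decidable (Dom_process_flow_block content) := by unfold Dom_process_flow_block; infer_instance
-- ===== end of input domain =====

-- B replaces A's split-into-a-list + indexed loop + join by a recursive descent parser that
-- find()s each '->' and emits the output directly; objective: alternative decomposition.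

-- ===== PORT A =====
def pvArrow : List Char := "<span class=\"flow-arrow\">→</span>".toList

def process_flow_block (content : String) : String :=
  let line := PySem.Chars.strip content.toList
  let steps := (PySem.Chars.splitOn line "->".toList).map PySem.Chars.strip
  let flow_html := (PySem.List.enumerate steps).foldl
    (fun acc p =>
      let step := p.2
      let is_result := PySem.Chars.startswith step "[".toList && PySem.Chars.endswith step "]".toList
      let acc' :=
        if is_result then
          acc ++ ["<div class=\"flow-box flow-result\">".toList ++ PySem.Chars.slice step (some 1) (some (-1)) ++ "</div>".toList]
        else
          acc ++ ["<div class=\"flow-box\">".toList ++ step ++ "</div>".toList]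
      if p.1 < (steps.length : Int) - 1 then acc' ++ [pvArrow] else acc')
    ["<div class=\"flow-diagram\">".toList]
  String.ofList (PySem.Chars.join ['\n'] (flow_html ++ ["</div>".toList]))

-- ===== PORT B =====
def pvArrowB : List Char := "\n<span class=\"flow-arrow\">→</span>\n".toList

-- B's `box`: strips its segment, then wraps it (result boxes detected by brackets)
def pvBoxB (seg : List Char) : List Char :=
  let s := PySem.Chars.strip seg
  if PySem.Chars.startswith s "[".toList && PySem.Chars.endswith s "]".toList then
    "<div class=\"flow-box flow-result\">".toList ++ PySem.Chars.slice s (some 1) (some (-1)) ++ "</div>".toList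
  else
    "<div class=\"flow-box\">".toList ++ s ++ "</div>".toList

-- B's `render`: recursive descent on the remaining text, finding the next '->'
def pvRender (rest : List Char) : List Char :=
  if h : PySem.Chars.find rest "->".toList < 0 then
    pvBoxB rest
  else
    pvBoxB (PySem.Chars.slice rest none (some (PySem.Chars.find rest "->".toList))) ++ pvArrowB ++
      pvRender (PySem.Chars.slice rest (some (PySem.Chars.find rest "->".toList + 2)) none)
termination_by rest.length
decreasing_by
  have hinf : "->".toList <:+: rest :=
    (PySem.Chars.find_nonneg_iff rest "->".toList).1 (by omega)
  have hlen : 2 ≤ rest.length := by simpa using hinf.length_le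
  simp only [PySem.Chars.slice_eq_listSlice,
    PySem.List.slice_from rest (by omega : (0:ℤ) ≤ PySem.Chars.find rest "->".toList + 2),
    List.length_drop]
  omega

def process_flow_block_alt (content : String) : String :=
  String.ofList ("<div class=\"flow-diagram\">\n".toList ++
    pvRender (PySem.Chars.strip content.toList) ++ "\n</div>".toList)

-- ===== PRECONDITION & SPEC =====
def Spec_process_flow_block (content : String) (out : String) : Prop := out = process_flow_block_alt content
instance (content : String) (out : String) : Decidable (Spec_process_flow_block content out) := by unfold Spec_process_flow_block; infer_instance

-- ===== CLAIM (what is proved, stated in full; the proofs are below) =====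
def Claim_equal_process_flow_block : Prop := ∀ (content : String), Dom_process_flow_block content → Spec_process_flow_block content (process_flow_block content)

-- ===== LEMMAS AND PROOFS =====

-- A's box on an ALREADY stripped step; pvBoxB seg = pvBoxA (strip seg) definitionally
def pvBoxA (step : List Char) : List Char :=
  if PySem.Chars.startswith step "[".toList && PySem.Chars.endswith step "]".toList then
    "<div class=\"flow-box flow-result\">".toList ++ PySem.Chars.slice step (some 1) (some (-1)) ++ "</div>".toList
  else
    "<div class=\"flow-box\">".toList ++ step ++ "</div>".toList

lemma pvBoxB_eq (seg : List Char) : pvBoxB seg = pvBoxA (PySem.Chars.strip seg) := rfl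

-- boxes interleaved with arrows, as A's loop emits them
def pvInter : List (List Char) → List (List Char)
  | [] => []
  | [x] => [pvBoxA x]
  | x :: y :: xs => pvBoxA x :: pvArrow :: pvInter (y :: xs)

lemma pvInter_cons_ne_nil (x : List Char) (xs : List (List Char)) : pvInter (x :: xs) ≠ [] := by
  cases xs <;> simp [pvInter]

lemma pvFold_eq (N : Int) (l : List (List Char)) :
    ∀ (s : Int) (acc : List (List Char)), s + l.length = N →
    (PySem.List.enumerate l s).foldl
      (fun acc p =>
        let step := p.2
        let is_result := PySem.Chars.startswith step "[".toList && PySem.Chars.endswith step "]".toList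
        let acc' :=
          if is_result then
            acc ++ ["<div class=\"flow-box flow-result\">".toList ++ PySem.Chars.slice step (some 1) (some (-1)) ++ "</div>".toList]
          else
            acc ++ ["<div class=\"flow-box\">".toList ++ step ++ "</div>".toList]
        if p.1 < N - 1 then acc' ++ [pvArrow] else acc') acc
    = acc ++ pvInter l := by
  induction l with
  | nil => intro s acc h; simp [PySem.List.enumerate_nil, pvInter]
  | cons x xs ih =>
    intro s acc h
    rw [PySem.List.enumerate_cons, List.foldl_cons]
    cases xs with
    | nil =>
      simp only [List.length_cons, List.length_nil] at h
      have hs : ¬ (s < N - 1) := by omega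
      simp only [PySem.List.enumerate_nil, List.foldl_nil, hs, if_false, pvInter, pvBoxA]
      split <;> rfl
    | cons y ys =>
      have hlen : (s + 1) + (y :: ys).length = N := by
        simp only [List.length_cons] at h ⊢; omega
      have hs : s < N - 1 := by simp only [List.length_cons] at h; omega
      rw [ih (s + 1) _ hlen]
      simp only [hs, if_true, pvInter, pvBoxA]
      split <;> simp

lemma pvJoin_append_singleton (c t : List Char) (m : List (List Char)) (hm : m ≠ []) :
    PySem.Chars.join c (m ++ [t]) = PySem.Chars.join c m ++ c ++ t := by
  induction m with
  | nil => exact absurd rfl hm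
  | cons x xs ih =>
    cases xs with
    | nil => simp [PySem.Chars.join_cons_cons, PySem.Chars.join_singleton]
    | cons y ys =>
      rw [show (x :: y :: ys) ++ [t] = x :: y :: (ys ++ [t]) from by simp,
        PySem.Chars.join_cons_cons,
        show y :: (ys ++ [t]) = (y :: ys) ++ [t] from by simp,
        ih (by simp), PySem.Chars.join_cons_cons]
      simp

lemma pvJoin_inter (l : List (List Char)) (hl : l ≠ []) :
    PySem.Chars.join ['\n'] (pvInter l)
      = PySem.Chars.join pvArrowB (l.map pvBoxA) := by
  induction l with
  | nil => exact absurd rfl hl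
  | cons x xs ih =>
    cases xs with
    | nil => simp [pvInter, PySem.Chars.join_singleton]
    | cons y ys =>
      have hy := pvInter_cons_ne_nil y ys
      obtain ⟨z, zs, hz⟩ := List.exists_cons_of_ne_nil hy
      rw [pvInter, List.map_cons, PySem.Chars.join_cons_cons, hz,
        PySem.Chars.join_cons_cons, ← hz, ih (by simp)]
      have harrow : ('\n' :: pvArrow) ++ ['\n'] = pvArrowB := by decide
      simp only [List.map_cons] at *
      rw [← harrow, PySem.Chars.join_cons_cons]
      simp

-- structural split on '->' (no fuel, no accumulator), used to relate A's splitOn to B's render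
def pvSplit2 : List Char → List (List Char)
  | [] => [[]]
  | c :: rest =>
    if "->".toList.isPrefixOf (c :: rest) then [] :: pvSplit2 (rest.drop 1)
    else
      match pvSplit2 rest with
      | [] => [[c]]
      | x :: xs => (c :: x) :: xs
termination_by l => l.length
decreasing_by
  · simp only [List.length_drop, List.length_cons]; omega
  · simp

lemma pvSplit2_ne_nil (l : List Char) : pvSplit2 l ≠ [] := by
  cases l with
  | nil => simp [pvSplit2]
  | cons c rest =>
    rw [pvSplit2]
    split
    · simp
    · split <;> simp

def pvConsHead (p : List Char) : List (List Char) → List (List Char)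
  | [] => [p]
  | x :: xs => (p ++ x) :: xs

lemma pvGo_eq : ∀ (fuel : Nat) (l cur : List Char) (acc : List (List Char)), l.length ≤ fuel →
    PySem.Chars.splitOn.go "->".toList fuel l cur acc
      = acc.reverse ++ pvConsHead cur.reverse (pvSplit2 l) := by
  intro fuel
  induction fuel with
  | zero =>
    intro l cur acc h
    have : l = [] := by cases l <;> simp_all
    subst this
    simp [PySem.Chars.splitOn.go, pvSplit2, pvConsHead]
  | succ n ih =>
    intro l cur acc h
    cases l with
    | nil => simp [PySem.Chars.splitOn.go, pvSplit2, pvConsHead]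
    | cons c rest =>
      rw [PySem.Chars.splitOn.go]
      by_cases hp : "->".toList.isPrefixOf (c :: rest) = true
      · rw [if_pos hp]
        have hdrop : List.drop ("->".toList.length) (c :: rest) = rest.drop 1 := by simp
        rw [hdrop, ih _ _ _ (by simp only [List.length_cons] at h; simp only [List.length_drop]; omega)]
        obtain ⟨x, xs, hx⟩ := List.exists_cons_of_ne_nil (pvSplit2_ne_nil (rest.drop 1))
        rw [pvSplit2, if_pos hp, hx]
        simp [pvConsHead]
      · rw [if_neg hp, ih _ _ _ (by simp only [List.length_cons] at h; omega)]
        obtain ⟨x, xs, hx⟩ := List.exists_cons_of_ne_nil (pvSplit2_ne_nil rest)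
        rw [pvSplit2, if_neg hp, hx]
        simp [pvConsHead]

lemma pvSplitOn_eq (s : List Char) : PySem.Chars.splitOn s "->".toList = pvSplit2 s := by
  rw [PySem.Chars.splitOn, pvGo_eq (s.length + 1) s [] [] (by omega)]
  obtain ⟨x, xs, hx⟩ := List.exists_cons_of_ne_nil (pvSplit2_ne_nil s)
  rw [hx]
  simp [pvConsHead]

lemma pvSplit2_of_not_infix (s : List Char) (h : ¬ "->".toList <:+: s) : pvSplit2 s = [s] := by
  induction s with
  | nil => simp [pvSplit2]
  | cons c rest ih =>
    have hp : ¬ "->".toList.isPrefixOf (c :: rest) = true := by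
      intro hpre
      exact h (List.isPrefixOf_iff_prefix.1 hpre).isInfix
    have hr : ¬ "->".toList <:+: rest := by
      intro ⟨u, v, huv⟩
      exact h ⟨c :: u, v, by simp [← huv]⟩
    rw [pvSplit2, if_neg hp, ih hr]

lemma pvSplit2_at : ∀ (k : Nat) (s : List Char), "->".toList <+: s.drop k →
    (∀ j < k, ¬ "->".toList <+: s.drop j) →
    pvSplit2 s = s.take k :: pvSplit2 (s.drop (k + 2)) := by
  intro k
  induction k with
  | zero =>
    intro s hpre _
    simp only [List.drop_zero] at hpre
    cases s with
    | nil => exact absurd (List.prefix_nil.1 hpre) (by simp)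
    | cons c rest =>
      rw [pvSplit2, if_pos (List.isPrefixOf_iff_prefix.2 hpre)]
      rfl
  | succ k ih =>
    intro s hpre hmin
    cases s with
    | nil =>
      rw [List.drop_nil] at hpre
      exact absurd (List.prefix_nil.1 hpre) (by decide)
    | cons c rest =>
      have hp : ¬ "->".toList.isPrefixOf (c :: rest) = true := by
        intro hb
        exact hmin 0 (by omega) (by simpa using List.isPrefixOf_iff_prefix.1 hb)
      rw [pvSplit2, if_neg hp,
        ih rest hpre (fun j hj => hmin (j + 1) (by omega))]
      obtain ⟨x, xs, hx⟩ := List.exists_cons_of_ne_nil (pvSplit2_ne_nil (rest.drop (k + 2)))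
      simp [hx]

lemma pvRender_join : ∀ (n : Nat) (s : List Char), s.length ≤ n →
    pvRender s = PySem.Chars.join pvArrowB ((pvSplit2 s).map pvBoxB) := by
  intro n
  induction n with
  | zero =>
    intro s h
    have : s = [] := by cases s <;> simp_all
    subst this
    rw [pvRender, dif_pos (by decide)]
    simp [pvSplit2, PySem.Chars.join_singleton]
  | succ n ih =>
    intro s h
    rw [pvRender]
    by_cases hneg : PySem.Chars.find s "->".toList < 0
    · rw [dif_pos hneg]
      have hinfix : ¬ "->".toList <:+: s := by
        rw [← PySem.Chars.find_eq_neg_one_iff]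
        have := PySem.Chars.neg_one_le_find s "->".toList
        omega
      rw [pvSplit2_of_not_infix s hinfix]
      simp [PySem.Chars.join_singleton]
    · rw [dif_neg hneg]
      have h0 : 0 ≤ PySem.Chars.find s "->".toList := by omega
      obtain ⟨hpre, hmin⟩ := PySem.Chars.find_spec h0
      have hlen2 : 2 ≤ s.length := by
        simpa using ((PySem.Chars.find_nonneg_iff s "->".toList).1 h0).length_le
      have hkbound : (PySem.Chars.find s "->".toList).toNat + 2 ≤ s.length := by
        have h1 := hpre.length_le
        rw [List.length_drop] at h1
        have h2 : ("->".toList).length = 2 := by decide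
        rw [h2] at h1
        omega
      rw [pvSplit2_at (PySem.Chars.find s "->".toList).toNat s hpre hmin]
      have hslice1 : PySem.Chars.slice s none (some (PySem.Chars.find s "->".toList))
          = s.take (PySem.Chars.find s "->".toList).toNat := by
        rw [PySem.Chars.slice_eq_listSlice, PySem.List.slice_to s h0]
      have hslice2 : PySem.Chars.slice s (some (PySem.Chars.find s "->".toList + 2)) none
          = s.drop ((PySem.Chars.find s "->".toList).toNat + 2) := by
        rw [PySem.Chars.slice_eq_listSlice, PySem.List.slice_from s (by omega)]
        congr 1
        omega
      rw [hslice1, hslice2,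
        ih (s.drop ((PySem.Chars.find s "->".toList).toNat + 2)) (by rw [List.length_drop]; omega)]
      obtain ⟨x, xs, hx⟩ := List.exists_cons_of_ne_nil
        (pvSplit2_ne_nil (s.drop ((PySem.Chars.find s "->".toList).toNat + 2)))
      rw [hx]
      simp [PySem.Chars.join_cons_cons]

-- ===== VERDICT (by name: the statement is the Claim_ definition above) =====
theorem process_flow_block_spec : Claim_equal_process_flow_block := by
  intro content _
  unfold Spec_process_flow_block
  simp only [process_flow_block, process_flow_block_alt]
  set line := PySem.Chars.strip content.toList with hline
  set steps := (PySem.Chars.splitOn line "->".toList).map PySem.Chars.strip with hsteps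
  have hne : steps ≠ [] := by
    rw [hsteps, pvSplitOn_eq]
    simp only [ne_eq, List.map_eq_nil_iff]
    exact pvSplit2_ne_nil _
  rw [pvFold_eq (steps.length : Int) steps 0 _ (by simp)]
  apply congrArg String.ofList
  obtain ⟨x, xs, hx⟩ := List.exists_cons_of_ne_nil hne
  have hm : pvInter steps ≠ [] := hx ▸ pvInter_cons_ne_nil x xs
  obtain ⟨z, zs, hz⟩ := List.exists_cons_of_ne_nil hm
  have e1 : "<div class=\"flow-diagram\">".toList ++ ['\n'] = "<div class=\"flow-diagram\">\n".toList := by decide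
  have e2 : ('\n' : Char) :: "</div>".toList = "\n</div>".toList := by decide
  have hmaps : steps.map pvBoxA = (pvSplit2 line).map pvBoxB := by
    rw [hsteps, pvSplitOn_eq, List.map_map]
    exact List.map_congr_left (fun a _ => (pvBoxB_eq a).symm)
  calc PySem.Chars.join ['\n'] (["<div class=\"flow-diagram\">".toList] ++ pvInter steps ++ ["</div>".toList])
      = PySem.Chars.join ['\n'] ("<div class=\"flow-diagram\">".toList :: z :: (zs ++ ["</div>".toList])) := by
        rw [hz]; simp
    _ = "<div class=\"flow-diagram\">".toList ++ ['\n'] ++ PySem.Chars.join ['\n'] ((z :: zs) ++ ["</div>".toList]) := by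
        rw [show (z :: (zs ++ ["</div>".toList])) = (z :: zs) ++ ["</div>".toList] from by simp] at *
        exact PySem.Chars.join_cons_cons _ _ _ _
    _ = "<div class=\"flow-diagram\">".toList ++ ['\n'] ++ (PySem.Chars.join ['\n'] (pvInter steps) ++ ['\n'] ++ "</div>".toList) := by
        rw [pvJoin_append_singleton ['\n'] "</div>".toList (z :: zs) (by simp), hz]
    _ = "<div class=\"flow-diagram\">\n".toList ++ pvRender line ++ "\n</div>".toList := by
        rw [pvJoin_inter steps hne, hmaps, ← pvRender_join line.length line le_rfl, ← e1, ← e2]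
        simp
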